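-- pv_equiv track=rewrite | github.com/v2-io/agentic-systems | bin/lint-md.py | is_in_code_span
-- ===== SOURCE A (Python) =====
-- def is_in_code_span(line, pos):
--     """Check if position is inside a backtick code span."""
--     in_code = False
--     i = 0
--     while i < len(line) and i < pos:
--         if line[i] == '`':
--             in_code = not in_code
--         i += 1
--     return in_code
-- ===== SOURCE B (Python) =====
-- def is_in_code_span(line, pos):
--     """Check if position is inside a backtick code span."""
--     i = line.find('`')
--     if i == -1 or i >= pos:
--         return False
--     return not is_in_code_span(line[i + 1:], pos - i - 1)
-- ===== Notes on version B (the rewrite author's own statement) =====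
-- stated objective: alternative
-- what changed: Replaces the per-character toggle loop by structural recursion on the string: find the first backtick with str.find, return False if it is absent or not before pos, otherwise slice past it and negate the recursive answer on the suffix; work is one C-level find/slice per backtick instead of one Python-level step per character.
import Mathlib
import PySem

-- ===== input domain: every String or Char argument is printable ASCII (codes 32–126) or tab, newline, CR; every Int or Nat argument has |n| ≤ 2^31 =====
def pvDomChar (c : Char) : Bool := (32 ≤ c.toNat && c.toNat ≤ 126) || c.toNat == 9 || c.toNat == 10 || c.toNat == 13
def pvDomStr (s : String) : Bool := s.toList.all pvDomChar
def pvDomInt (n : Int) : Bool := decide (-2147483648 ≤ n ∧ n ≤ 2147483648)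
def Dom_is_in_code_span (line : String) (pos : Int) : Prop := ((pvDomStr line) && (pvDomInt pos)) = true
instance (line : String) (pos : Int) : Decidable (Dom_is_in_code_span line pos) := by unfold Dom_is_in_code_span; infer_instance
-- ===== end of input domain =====

-- B replaces A's per-character toggle loop by recursion: find the first backtick, slice past it, negate the suffix answer (alternative decomposition, same cost).


-- ===== PORT A =====
-- 'while i < len(line) and i < pos' toggling in_code on '`': structural recursion over the
-- remaining characters carries i, pos, and the flag; the list running out is 'i < len(line)' failing.
def pvLoopA : List Char → Int → Int → Bool → Bool
  | [], _, _, in_code => in_code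
  | c :: rest, i, pos, in_code =>
      if i < pos then pvLoopA rest (i + 1) pos (if c = '`' then !in_code else in_code)
      else in_code

def is_in_code_span (line : String) (pos : Int) : Bool :=
  pvLoopA line.toList 0 pos false

-- ===== PORT B =====
-- termination fact for the recursion: a found backtick lies inside the list
theorem pvFind_lt_length (s : List Char) (h : PySem.Chars.find s ['`'] ≠ -1) :
    (PySem.Chars.find s ['`']).toNat < s.length := by
  have h0 : 0 ≤ PySem.Chars.find s ['`'] := by
    have := PySem.Chars.neg_one_le_find s ['`']; omega
  have hs := (PySem.Chars.find_spec h0).1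
  have hlen := hs.length_le
  simp only [List.length_drop, List.length_cons, List.length_nil] at hlen
  omega

-- i = line.find('`'); if i == -1 or i >= pos: return False; return not is_in_code_span(line[i+1:], pos-i-1)
def pvAltGo (s : List Char) (pos : Int) : Bool :=
  let i := PySem.Chars.find s ['`']
  if h : i = -1 ∨ pos ≤ i then false
  else !(pvAltGo (PySem.List.slice s (some (i + 1)) none) (pos - i - 1))
termination_by s.length
decreasing_by
  have h1 : PySem.Chars.find s ['`'] ≠ -1 := by tauto
  have h0 : 0 ≤ PySem.Chars.find s ['`'] := by
    have := PySem.Chars.neg_one_le_find s ['`']; omega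
  have hlt := pvFind_lt_length s h1
  rw [PySem.List.slice_from (ha := by omega)]
  simp only [List.length_drop]
  omega

def is_in_code_span_alt (line : String) (pos : Int) : Bool :=
  pvAltGo line.toList pos

-- ===== PRECONDITION & SPEC =====
def Spec_is_in_code_span (line : String) (pos : Int) (out : Bool) : Prop := out = is_in_code_span_alt line pos
instance (line : String) (pos : Int) (out : Bool) : Decidable (Spec_is_in_code_span line pos out) := by unfold Spec_is_in_code_span; infer_instance

-- ===== CLAIM (what is proved, stated in full; the proofs are below) =====
def Claim_equal_is_in_code_span : Prop := ∀ (line : String) (pos : Int), Dom_is_in_code_span line pos → Spec_is_in_code_span line pos (is_in_code_span line pos)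

-- ===== LEMMAS AND PROOFS =====
theorem pvLoopA_eq (pos : Int) : ∀ (xs : List Char) (i : Int) (acc : Bool),
    pvLoopA xs i pos acc = (acc != decide ((xs.take (pos - i).toNat).count '`' % 2 = 1)) := by
  intro xs
  induction xs with
  | nil => intro i acc; simp [pvLoopA]
  | cons c rest ih =>
    intro i acc
    by_cases h : i < pos
    · have hn : (pos - i).toNat = (pos - (i + 1)).toNat + 1 := by omega
      rw [show pvLoopA (c :: rest) i pos acc
            = pvLoopA rest (i + 1) pos (if c = '`' then !acc else acc) by
            simp [pvLoopA, h]]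
      rw [ih]
      rw [hn, List.take_succ_cons, List.count_cons]
      by_cases hc : c = '`'
      · simp only [hc, beq_self_eq_true, if_pos]
        rcases Nat.even_or_odd ((rest.take (pos - (i+1)).toNat).count '`') with he | ho
        · have h1 : (rest.take (pos - (i+1)).toNat).count '`' % 2 = 0 := Nat.even_iff.mp he
          have h2 : ((rest.take (pos - (i+1)).toNat).count '`' + 1) % 2 = 1 := by omega
          simp [h1, h2]
        · have h1 : (rest.take (pos - (i+1)).toNat).count '`' % 2 = 1 := Nat.odd_iff.mp ho
          have h2 : ((rest.take (pos - (i+1)).toNat).count '`' + 1) % 2 = 0 := by omega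
          simp [h1, h2]
      · simp [hc]
    · have hn : (pos - i).toNat = 0 := by omega
      rw [show pvLoopA (c :: rest) i pos acc = acc by simp [pvLoopA, h]]
      simp [hn]

-- a singleton prefix of a drop is exactly the character at that index
theorem pvPrefix_drop_iff (s : List Char) (j : Nat) :
    (['`'] <+: s.drop j) ↔ s[j]? = some '`' := by
  rw [← List.head?_drop]
  cases hd : s.drop j with
  | nil => simp
  | cons c rest => simp [List.cons_prefix_cons, eq_comm]

-- characters strictly before the first backtick are not backticks, so their count is 0
theorem pvCount_take_before (s : List Char) (k n : Nat)
    (hmin : ∀ j < k, s[j]? ≠ some '`') (hn : n ≤ k) :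
    (s.take n).count '`' = 0 := by
  rw [List.count_eq_zero]
  intro hmem
  obtain ⟨j, hj, hje⟩ := List.getElem_of_mem hmem
  have hjm : j < min n s.length := by simpa using hj
  have hje' : s[j]'(by omega) = '`' := by
    simpa [List.getElem_take] using hje
  exact hmin j (by omega) (by rw [List.getElem?_eq_getElem (by omega), hje'])

theorem pvAltGo_eq (s : List Char) (pos : Int) :
    pvAltGo s pos = decide ((s.take pos.toNat).count '`' % 2 = 1) := by
  induction hlen : s.length using Nat.strong_induction_on generalizing s pos with
  | _ n ih =>
  subst hlen
  rw [pvAltGo]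
  set i := PySem.Chars.find s ['`'] with hi
  by_cases hne : i = -1
  · have hnot : '`' ∉ s := by
      intro hmem
      have : (['`'] : List Char) <:+: s := by
        obtain ⟨l1, l2, hsplit⟩ := List.mem_iff_append.mp hmem
        exact ⟨l1, l2, by simp [hsplit]⟩
      exact (PySem.Chars.find_eq_neg_one_iff s ['`']).mp hne this
    have hz : (s.take pos.toNat).count '`' = 0 :=
      List.count_eq_zero.mpr (fun hm => hnot (List.mem_of_mem_take hm))
    simp [hne, hz]
  · have h0 : 0 ≤ i := by have := PySem.Chars.neg_one_le_find s ['`']; omega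
    have hspec := PySem.Chars.find_spec (s := s) (sub := ['`']) (by rw [← hi]; exact h0)
    rw [← hi] at hspec
    have hmin : ∀ j < i.toNat, s[j]? ≠ some '`' := fun j hj => by
      have := hspec.2 j hj
      rw [pvPrefix_drop_iff] at this
      exact this
    by_cases hge : pos ≤ i
    · have hz : (s.take pos.toNat).count '`' = 0 :=
        pvCount_take_before s i.toNat pos.toNat hmin (by omega)
      simp [hne, hge, hz]
    · rw [dif_neg (by push Not; exact ⟨hne, by omega⟩)]
      have hklt : i.toNat < s.length := pvFind_lt_length s hne
      set k := i.toNat with hk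
      rw [PySem.List.slice_from (ha := by omega)]
      have hd1 : (i + 1).toNat = k + 1 := by omega
      rw [hd1]
      rw [ih (s.drop (k + 1)).length (by simp; omega) _ _ rfl]
      have hgk : s[k]? = some '`' := (pvPrefix_drop_iff s k).mp hspec.1
      have hgk' : s[k]'hklt = '`' := by
        rw [List.getElem?_eq_getElem hklt] at hgk
        injection hgk
      have hpos : k + 1 ≤ pos.toNat := by omega
      have hsplit : s.take pos.toNat = s.take k ++ List.take (pos.toNat - k) (s.drop k) := by
        rw [← List.take_add]
        congr 1
        omega
      have hdk : s.drop k = '`' :: s.drop (k + 1) := by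
        have := List.getElem_cons_drop (as := s) (i := k) hklt
        rw [hgk'] at this
        exact this.symm
      have hcount0 : (s.take k).count '`' = 0 :=
        pvCount_take_before s k k hmin (le_refl k)
      have htk : List.take (pos.toNat - k) (s.drop k)
          = '`' :: List.take (pos.toNat - k - 1) (s.drop (k + 1)) := by
        rw [hdk]
        have h3 : pos.toNat - k = (pos.toNat - k - 1) + 1 := by omega
        rw [h3, List.take_succ_cons]
        simp
      have harg : (pos - i - 1).toNat = pos.toNat - k - 1 := by omega
      rw [hsplit, List.count_append, hcount0, htk, List.count_cons, harg]
      simp only [beq_self_eq_true, if_pos, Nat.zero_add]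
      rcases Nat.even_or_odd ((List.take (pos.toNat - k - 1) (s.drop (k + 1))).count '`') with he | ho
      · have h1 := Nat.even_iff.mp he
        have h2 : ((List.take (pos.toNat - k - 1) (s.drop (k + 1))).count '`' + 1) % 2 = 1 := by omega
        simp [h1, h2]
      · have h1 := Nat.odd_iff.mp ho
        have h2 : ((List.take (pos.toNat - k - 1) (s.drop (k + 1))).count '`' + 1) % 2 = 0 := by omega
        simp [h1, h2]
-- ===== VERDICT (by name: the statement is the Claim_ definition above) =====
theorem is_in_code_span_spec : Claim_equal_is_in_code_span := by
  intro line pos _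
  unfold Spec_is_in_code_span is_in_code_span is_in_code_span_alt
  rw [pvLoopA_eq, pvAltGo_eq]
  have : (pos - 0).toNat = pos.toNat := by omega
  rw [this]
  cases decide ((line.toList.take pos.toNat).count '`' % 2 = 1) <;> rfl
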